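-- pv_equiv track=rewrite | github.com/matteotoso/SmartContractSecurityMLProject | BalanceDataset-Sez4.6/undersampling.py | extract_categories_and_severity
-- ===== SOURCE A (Python) =====
-- TARGET_CATEGORIES = {
--     "REENTRANCY",
--     "ENVIRONMENTAL / TIME DEPENDENCE",
--     "DENIAL OF SERVICE (DOS)",
--     "LOGIC / IMPLEMENTATION BUGS",
-- }
--
-- SEVERITY_ORDER = {"Unknown": 0, "Low": 1, "Medium": 2, "High": 3}
--
-- def extract_categories_and_severity(vulns):
--     """
--     Dato un elenco di vulnerabilità, calcola:
--
--       - l'insieme delle categorie presenti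
--       - la severità massima per ciascuna categoria target (se presente)
--
--     Restituisce:
--       (set_categorie, dict_categoria -> max_severity)
--     """
--     cats = set()
--     per_cat_max_sev = {}
--
--     for v in vulns:
--         cat = v.get("categoria")
--         if not cat:
--             continue
--         cats.add(cat)
--
--         if cat in TARGET_CATEGORIES:
--             sev = v.get("severity", "Unknown")
--             old = per_cat_max_sev.get(cat)
--             if old is None or SEVERITY_ORDER.get(sev, 0) > SEVERITY_ORDER.get(old, 0):
--                 per_cat_max_sev[cat] = sev
--
--     return cats, per_cat_max_sev
-- ===== SOURCE B (Python) =====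
-- TARGET_CATEGORIES = {
--     "REENTRANCY",
--     "ENVIRONMENTAL / TIME DEPENDENCE",
--     "DENIAL OF SERVICE (DOS)",
--     "LOGIC / IMPLEMENTATION BUGS",
-- }
--
-- SEVERITY_ORDER = {"Unknown": 0, "Low": 1, "Medium": 2, "High": 3}
--
--
-- def _cat(v):
--     """Category of a vulnerability entry, or None when absent/empty."""
--     c = v.get("categoria")
--     return c if c else None
--
--
-- def extract_categories_and_severity(vulns):
--     # Pass 1: all non-empty categories, as a set.
--     cats = {c for c in map(_cat, vulns) if c is not None}
--
--     # Pass 2: group the severities of each target category, in encounter order.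
--     groups = {}
--     for v in vulns:
--         c = _cat(v)
--         if c is not None and c in TARGET_CATEGORIES:
--             groups.setdefault(c, []).append(v.get("severity", "Unknown"))
--
--     # Reduce each group with max; max keeps the first maximal element on ties,
--     # so this matches an online strictly-greater running max.
--     per_cat_max_sev = {
--         c: max(sevs, key=lambda s: SEVERITY_ORDER.get(s, 0))
--         for c, sevs in groups.items()
--     }
--     return cats, per_cat_max_sev
-- ===== Notes on version B (the rewrite author's own statement) =====
-- stated objective: simpler
-- what changed: Replaces the single loop with an interleaved online running-max dict by three clear stages: a set comprehension for the categories, a grouping pass collecting each target category's severities in order, and a per-group reduction with max(key=...).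
import Mathlib
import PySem

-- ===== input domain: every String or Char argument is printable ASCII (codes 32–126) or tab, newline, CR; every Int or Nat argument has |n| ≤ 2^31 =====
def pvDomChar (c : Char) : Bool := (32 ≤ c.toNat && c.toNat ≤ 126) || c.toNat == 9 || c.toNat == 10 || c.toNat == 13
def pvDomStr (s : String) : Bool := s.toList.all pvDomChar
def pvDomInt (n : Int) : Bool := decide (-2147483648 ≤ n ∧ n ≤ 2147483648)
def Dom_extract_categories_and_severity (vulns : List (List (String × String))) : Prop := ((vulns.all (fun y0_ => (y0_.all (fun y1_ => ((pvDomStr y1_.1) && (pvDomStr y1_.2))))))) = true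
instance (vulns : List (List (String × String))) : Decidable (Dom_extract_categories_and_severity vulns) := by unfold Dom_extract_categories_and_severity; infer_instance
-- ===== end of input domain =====

-- B replaces A's single loop with an interleaved online running-max dict by three stages:
-- collect the category set, group severities per target category, reduce each group with max.


def TARGET_CATEGORIES : PySem.Set String :=
  PySem.Set.ofList ["REENTRANCY", "ENVIRONMENTAL / TIME DEPENDENCE",
                    "DENIAL OF SERVICE (DOS)", "LOGIC / IMPLEMENTATION BUGS"]

def SEVERITY_ORDER : PySem.Dict String Int :=
  PySem.Dict.ofList [("Unknown", 0), ("Low", 1), ("Medium", 2), ("High", 3)]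

-- ===== PORT A =====
-- loop body of A: online running max per target category, set of categories, one pass
def pvStepA (st : PySem.Set String × PySem.Dict String String) (v : List (String × String)) :
    PySem.Set String × PySem.Dict String String :=
  match (PySem.Dict.mk v).get? "categoria" with
  | none => st                      -- cat is None: continue
  | some cat =>
    if cat = "" then st             -- cat falsy: continue
    else
      let cats := PySem.Set.add st.1 cat
      if TARGET_CATEGORIES.contains cat then
        let sev := (PySem.Dict.mk v).getD "severity" "Unknown"
        match st.2.get? cat with
        | none => (cats, st.2.insert cat sev)
        | some old =>
          if SEVERITY_ORDER.getD old 0 < SEVERITY_ORDER.getD sev 0 then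
            (cats, st.2.insert cat sev)
          else (cats, st.2)
      else (cats, st.2)

def extract_categories_and_severity (vulns : List (List (String × String))) : List String × (List (String × String)) :=
  let st := vulns.foldl pvStepA (PySem.Set.empty, PySem.Dict.empty)
  (st.1, st.2.items)

-- ===== PORT B =====
-- helper _cat: category of an entry, or none when absent/empty
def pvCat (v : List (String × String)) : Option String :=
  match (PySem.Dict.mk v).get? "categoria" with
  | none => none
  | some c => if c = "" then none else some c

def pvSevOrd (s : String) : Int := SEVERITY_ORDER.getD s 0

-- loop body of B's grouping pass: setdefault + append
def pvStepB (g : PySem.Dict String (List String)) (v : List (String × String)) :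
    PySem.Dict String (List String) :=
  match pvCat v with
  | none => g
  | some c =>
    if TARGET_CATEGORIES.contains c then
      g.modify c [] (· ++ [(PySem.Dict.mk v).getD "severity" "Unknown"])
    else g

def extract_categories_and_severity_alt (vulns : List (List (String × String))) : List String × (List (String × String)) :=
  -- pass 1: set comprehension over the categories
  let cats : PySem.Set String := PySem.Set.ofList (vulns.filterMap pvCat)
  -- pass 2: group severities per target category, in encounter order
  let groups : PySem.Dict String (List String) := vulns.foldl pvStepB PySem.Dict.empty
  -- pass 3: reduce each group with max(key=...) (first maximal element)
  let per_cat_max_sev : List (String × String) :=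
    groups.items.map (fun p => (p.1, (PySem.List.max? p.2 pvSevOrd).getD "Unknown"))
  (cats, per_cat_max_sev)

-- ===== PRECONDITION & SPEC =====
def Spec_extract_categories_and_severity (vulns : List (List (String × String))) (out : List String × (List (String × String))) : Prop := out = extract_categories_and_severity_alt vulns
instance (vulns : List (List (String × String))) (out : List String × (List (String × String))) : Decidable (Spec_extract_categories_and_severity vulns out) := by unfold Spec_extract_categories_and_severity; infer_instance

-- ===== CLAIM (what is proved, stated in full; the proofs are below) =====
def Claim_equal_extract_categories_and_severity : Prop := ∀ (vulns : List (List (String × String))), Dom_extract_categories_and_severity vulns → Spec_extract_categories_and_severity vulns (extract_categories_and_severity vulns)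

-- ===== LEMMAS AND PROOFS =====

-- B's reduction of one group
def pvMx (l : List String) : String := (PySem.List.max? l pvSevOrd).getD "Unknown"

-- B's reduction applied to every value of the group dict
def pvMapMax (g : PySem.Dict String (List String)) : PySem.Dict String String :=
  PySem.Dict.mk (g.items.map (fun p => (p.1, pvMx p.2)))

theorem pvMapMax_get? (g : PySem.Dict String (List String)) (k : String) :
    (pvMapMax g).get? k = (g.get? k).map pvMx := by
  simp [pvMapMax, PySem.Dict.get?, List.find?_map, Function.comp_def, Option.map_map]

theorem pvMapMax_contains (g : PySem.Dict String (List String)) (k : String) :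
    (pvMapMax g).contains k = g.contains k := by
  simp [pvMapMax, PySem.Dict.contains, List.any_map, Function.comp_def]

theorem pvMapMax_insert (g : PySem.Dict String (List String)) (k : String) (v : List String) :
    pvMapMax (g.insert k v) = (pvMapMax g).insert k (pvMx v) := by
  unfold PySem.Dict.insert
  rw [pvMapMax_contains]
  by_cases h : g.contains k = true
  · simp only [h, if_true]
    simp only [pvMapMax, List.map_map]
    congr 1
    apply List.map_congr_left
    intro p _
    by_cases hp : p.1 = k <;> simp [hp]
  · simp only [h, if_false, Bool.false_eq_true]
    simp [pvMapMax]

-- inserting the value a key already holds changes nothing (keys are unique)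
theorem pv_insert_self (d : PySem.Dict String String) (k v : String)
    (hnd : d.keys.Nodup) (h : d.get? k = some v) : d.insert k v = d := by
  apply PySem.Dict.ext
  rw [PySem.Dict.items_insert_of_contains]
  · conv_rhs => rw [← List.map_id d.items]
    apply List.map_congr_left
    intro p hp
    by_cases hpk : p.1 = k
    · have h2 : d.get? p.1 = some p.2 :=
        PySem.Dict.get?_of_mem_items (d := d) (k := p.1) (v := p.2) (by simpa using hp) hnd
      rw [hpk, h] at h2
      obtain ⟨p1, p2⟩ := p
      simp_all
    · simp [hpk]
  · rw [PySem.Dict.contains_eq_isSome_get?, h]; rfl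

-- running max over an appended element: appended wins only strictly
theorem pvMx_append (l : List String) (m s : String)
    (h : PySem.List.max? l pvSevOrd = some m) :
    pvMx (l ++ [s]) = if pvSevOrd m < pvSevOrd s then s else m := by
  simp only [pvMx, PySem.List.max?, List.foldl_append] at *
  rw [h]
  by_cases hc : pvSevOrd m < pvSevOrd s <;> simp [hc]

theorem pvMapMax_keys (g : PySem.Dict String (List String)) :
    (pvMapMax g).keys = g.keys := by
  simp [pvMapMax, PySem.Dict.keys]

theorem pv_loop (vs : List (List (String × String))) (cats : PySem.Set String)
    (g : PySem.Dict String (List String))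
    (hnd : g.keys.Nodup) (hne : ∀ p ∈ g.items, p.2 ≠ []) :
    vs.foldl pvStepA (cats, pvMapMax g)
      = (PySem.Set.update cats (vs.filterMap pvCat), pvMapMax (vs.foldl pvStepB g)) := by
  induction vs generalizing cats g with
  | nil => rfl
  | cons v vs ih =>
    simp only [List.foldl_cons, List.filterMap_cons]
    cases hc : (PySem.Dict.mk v).get? "categoria" with
    | none =>
      have hcat : pvCat v = none := by simp [pvCat, hc]
      have hA : pvStepA (cats, pvMapMax g) v = (cats, pvMapMax g) := by
        simp [pvStepA, hc]
      have hB : pvStepB g v = g := by simp [pvStepB, hcat]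
      rw [hcat, hA, hB]
      exact ih cats g hnd hne
    | some c =>
      by_cases hce : c = ""
      · have hcat : pvCat v = none := by simp [pvCat, hc, hce]
        have hA : pvStepA (cats, pvMapMax g) v = (cats, pvMapMax g) := by
          simp [pvStepA, hc, hce]
        have hB : pvStepB g v = g := by simp [pvStepB, hcat]
        rw [hcat, hA, hB]
        exact ih cats g hnd hne
      · have hcat : pvCat v = some c := by simp [pvCat, hc, hce]
        have hupd : PySem.Set.update cats (c :: vs.filterMap pvCat)
            = PySem.Set.update (PySem.Set.add cats c) (vs.filterMap pvCat) := rfl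
        by_cases ht : c ∈ TARGET_CATEGORIES
        · cases hg : g.get? c with
          | none =>
            have hA : pvStepA (cats, pvMapMax g) v
                = (PySem.Set.add cats c,
                   (pvMapMax g).insert c ((PySem.Dict.mk v).getD "severity" "Unknown")) := by
              simp [pvStepA, hc, hce, ht, pvMapMax_get?, hg]
            have hB : pvStepB g v
                = g.insert c [(PySem.Dict.mk v).getD "severity" "Unknown"] := by
              simp [pvStepB, hcat, ht, PySem.Dict.modify, PySem.Dict.getD_of_get?_eq_none g [] hg]
            have hmm : pvMapMax (g.insert c [(PySem.Dict.mk v).getD "severity" "Unknown"])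
                = (pvMapMax g).insert c ((PySem.Dict.mk v).getD "severity" "Unknown") := by
              rw [pvMapMax_insert]
              rfl
            rw [hcat, hA, hB, hupd, ← hmm]
            apply ih
            · exact PySem.Dict.nodup_keys_insert g c _ hnd
            · intro p hp
              rcases (PySem.Dict.mem_items_insert g c _ p).mp hp with h1 | h2
              · subst h1; simp
              · exact hne p h2.1
          | some l =>
            have hl : l ≠ [] :=
              hne (c, l) (PySem.Dict.mem_items_of_get?_eq_some g hg)
            cases hms : PySem.List.max? l pvSevOrd with
            | none => exact absurd ((PySem.List.max?_eq_none_iff l pvSevOrd).mp hms) hl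
            | some m =>
              have hmxl : pvMx l = m := by simp [pvMx, hms]
              have hgetA : (pvMapMax g).get? c = some m := by
                rw [pvMapMax_get?, hg]; simp [hmxl]
              have hB : pvStepB g v
                  = g.insert c (l ++ [(PySem.Dict.mk v).getD "severity" "Unknown"]) := by
                simp [pvStepB, hcat, ht, PySem.Dict.modify, PySem.Dict.getD_of_get?_eq_some g [] hg]
              have hmm : pvMapMax (g.insert c (l ++ [(PySem.Dict.mk v).getD "severity" "Unknown"]))
                  = (pvMapMax g).insert c
                      (if pvSevOrd m < pvSevOrd ((PySem.Dict.mk v).getD "severity" "Unknown")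
                       then (PySem.Dict.mk v).getD "severity" "Unknown" else m) := by
                rw [pvMapMax_insert, pvMx_append l m _ hms]
              have hnd' : (g.insert c (l ++ [(PySem.Dict.mk v).getD "severity" "Unknown"])).keys.Nodup :=
                PySem.Dict.nodup_keys_insert g c _ hnd
              have hne' : ∀ p ∈ (g.insert c (l ++ [(PySem.Dict.mk v).getD "severity" "Unknown"])).items,
                  p.2 ≠ [] := by
                intro p hp
                rcases (PySem.Dict.mem_items_insert g c _ p).mp hp with h1 | h2
                · subst h1; simp
                · exact hne p h2.1
              by_cases hlt : pvSevOrd m < pvSevOrd ((PySem.Dict.mk v).getD "severity" "Unknown")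
              · have hlt' : SEVERITY_ORDER.getD m 0
                    < SEVERITY_ORDER.getD ((PySem.Dict.mk v).getD "severity" "Unknown") 0 := hlt
                have hA : pvStepA (cats, pvMapMax g) v
                    = (PySem.Set.add cats c,
                       (pvMapMax g).insert c ((PySem.Dict.mk v).getD "severity" "Unknown")) := by
                  simp [pvStepA, hc, hce, ht, hgetA, hlt']
                have hmm2 : pvMapMax (g.insert c (l ++ [(PySem.Dict.mk v).getD "severity" "Unknown"]))
                    = (pvMapMax g).insert c ((PySem.Dict.mk v).getD "severity" "Unknown") := by
                  rw [hmm, if_pos hlt]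
                rw [hcat, hA, hB, hupd, ← hmm2]
                exact ih _ _ hnd' hne'
              · have hlt' : ¬ (SEVERITY_ORDER.getD m 0
                    < SEVERITY_ORDER.getD ((PySem.Dict.mk v).getD "severity" "Unknown") 0) := hlt
                have hA : pvStepA (cats, pvMapMax g) v = (PySem.Set.add cats c, pvMapMax g) := by
                  simp [pvStepA, hc, hce, ht, hgetA, hlt']
                have hself : (pvMapMax g).insert c m = pvMapMax g :=
                  pv_insert_self (pvMapMax g) c m (pvMapMax_keys g ▸ hnd) hgetA
                have hmm2 : pvMapMax (g.insert c (l ++ [(PySem.Dict.mk v).getD "severity" "Unknown"]))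
                    = pvMapMax g := by
                  rw [hmm, if_neg hlt, hself]
                rw [hcat, hA, hB, hupd, ← hmm2]
                exact ih _ _ hnd' hne'
        · have hA : pvStepA (cats, pvMapMax g) v = (PySem.Set.add cats c, pvMapMax g) := by
            simp [pvStepA, hc, hce, ht]
          have hB : pvStepB g v = g := by simp [pvStepB, hcat, ht]
          rw [hcat, hA, hB, hupd]
          exact ih _ _ hnd hne

-- ===== VERDICT (by name: the statement is the Claim_ definition above) =====
theorem extract_categories_and_severity_spec : Claim_equal_extract_categories_and_severity := by
  intro vulns _
  unfold Spec_extract_categories_and_severity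
  unfold extract_categories_and_severity extract_categories_and_severity_alt
  have h := pv_loop vulns PySem.Set.empty PySem.Dict.empty
    (by simp [PySem.Dict.keys, PySem.Dict.empty])
    (by intro p hp; simp [PySem.Dict.empty] at hp)
  rw [show pvMapMax PySem.Dict.empty = PySem.Dict.empty from rfl] at h
  rw [h]
  simp only [pvMapMax, PySem.Set.ofList, PySem.Set.update]
  rfl
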